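-- pv_equiv track=rewrite | github.com/VvR7/SYSUAILAB | Lab3/code/15-puzzle-Astar.py | calc
-- ===== SOURCE A (Python) =====
-- def calc(a):
--     d = []
--     row = 0
--     for i in range(1, 5):
--         for j in range(1, 5):
--             if a[i][j] != 0:
--                 d.append(a[i][j])
--             else:
--                 row = 5 - i
--     ans = 0
--     for i in range(len(d)):
--         for j in range(i):
--             if d[j] > d[i]:
--                 ans += 1
--     return ans + row
-- ===== SOURCE B (Python) =====
-- def _sort_count(l):
--     # merge sort returning (sorted list, number of inversions)
--     if len(l) <= 1:
--         return l, 0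
--     m = len(l) // 2
--     ls, cl = _sort_count(l[:m])
--     rs, cr = _sort_count(l[m:])
--     merged = []
--     inv = 0
--     i = j = 0
--     while i < len(ls) and j < len(rs):
--         if ls[i] <= rs[j]:
--             merged.append(ls[i])
--             i += 1
--         else:
--             inv += len(ls) - i
--             merged.append(rs[j])
--             j += 1
--     merged += ls[i:]
--     merged += rs[j:]
--     return merged, cl + cr + inv
--
-- def calc(a):
--     d = []
--     row = 0
--     for i in range(1, 5):
--         for j in range(1, 5):
--             v = a[i][j]
--             if v != 0:
--                 d.append(v)
--             else:
--                 row = 5 - i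
--     return _sort_count(d)[1] + row
-- ===== Notes on version B (the rewrite author's own statement) =====
-- stated objective: alternative
-- what changed: The O(k^2) nested double loop counting inversion pairs is replaced by a merge sort that counts inversions during the merge (O(k log k)); the flatten/blank-row pass is unchanged.
import Mathlib
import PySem

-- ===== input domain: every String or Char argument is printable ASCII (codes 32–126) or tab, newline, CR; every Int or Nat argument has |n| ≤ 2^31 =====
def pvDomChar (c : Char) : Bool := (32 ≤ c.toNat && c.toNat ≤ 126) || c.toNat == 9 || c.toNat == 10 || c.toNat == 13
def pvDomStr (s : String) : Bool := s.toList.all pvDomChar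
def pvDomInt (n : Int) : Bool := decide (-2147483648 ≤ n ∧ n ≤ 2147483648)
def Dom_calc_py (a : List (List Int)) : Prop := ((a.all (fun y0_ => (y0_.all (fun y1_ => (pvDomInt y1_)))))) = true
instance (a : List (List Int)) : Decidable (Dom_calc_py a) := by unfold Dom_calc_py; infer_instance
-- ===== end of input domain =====

-- B replaces A's O(k^2) nested inversion-pair double loop by a merge sort that counts
-- inversions during the merge; the flatten/blank-row pass is unchanged (objective: alternative).

-- ===== PORT A =====
def calc_py (a : List (List Int)) : Int :=
  let st := (PySem.List.pyRange 1 5 1).foldl (fun (st : List Int × Int) i =>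
      (PySem.List.pyRange 1 5 1).foldl (fun (st : List Int × Int) j =>
        if PySem.List.pyGetD (PySem.List.pyGetD a i []) j 0 ≠ 0 then
          (st.1 ++ [PySem.List.pyGetD (PySem.List.pyGetD a i []) j 0], st.2)
        else
          (st.1, 5 - i)) st) ([], 0)
  let d := st.1
  let ans := (PySem.List.pyRange 0 (d.length : Int) 1).foldl (fun ans i =>
      (PySem.List.pyRange 0 i 1).foldl (fun ans j =>
        if PySem.List.pyGetD d j 0 > PySem.List.pyGetD d i 0 then ans + 1 else ans) ans) 0
  ans + st.2

-- ===== PORT B =====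
-- merge two runs, counting (for each element taken from the right) the remaining left elements
def mergeCount : List Int → List Int → List Int × Int
  | [], r => (r, 0)
  | x :: xs, [] => (x :: xs, 0)
  | x :: xs, y :: ys =>
    if x ≤ y then
      let p := mergeCount xs (y :: ys)
      (x :: p.1, p.2)
    else
      let p := mergeCount (x :: xs) ys
      (y :: p.1, p.2 + ((x :: xs).length : Int))

-- merge sort returning (sorted list, inversion count)   [Python helper _sort_count]
def sortCount (l : List Int) : List Int × Int :=
  if h : l.length ≤ 1 then (l, 0)
  else
    let m := l.length / 2
    let p1 := sortCount (l.take m)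
    let p2 := sortCount (l.drop m)
    let p := mergeCount p1.1 p2.1
    (p.1, p1.2 + p2.2 + p.2)
termination_by l.length
decreasing_by
  · simp only [List.length_take]; omega
  · simp only [List.length_drop]; omega

def calc_py_alt (a : List (List Int)) : Int :=
  let st := (PySem.List.pyRange 1 5 1).foldl (fun (st : List Int × Int) i =>
      (PySem.List.pyRange 1 5 1).foldl (fun (st : List Int × Int) j =>
        if PySem.List.pyGetD (PySem.List.pyGetD a i []) j 0 ≠ 0 then
          (st.1 ++ [PySem.List.pyGetD (PySem.List.pyGetD a i []) j 0], st.2)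
        else
          (st.1, 5 - i)) st) ([], 0)
  (sortCount st.1).2 + st.2

-- ===== PRECONDITION & SPEC =====
-- Pre_ excludes exactly the boards on which the Python A raises IndexError:
-- it reads a[i][j] for all i, j in 1..4, so a needs at least 5 rows and rows 1..4 need at least 5 entries.
def Pre_calc_py (a : List (List Int)) : Prop :=
  5 ≤ a.length ∧ ∀ r ∈ (a.drop 1).take 4, 5 ≤ r.length
instance (a : List (List Int)) : Decidable (Pre_calc_py a) := by unfold Pre_calc_py; infer_instance

def pvWitness_calc_py : List (List Int) :=
  [[0,0,0,0,0],[0,1,2,3,4],[0,5,6,7,8],[0,9,10,11,12],[0,13,14,15,0]]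

def Spec_calc_py (a : List (List Int)) (out : Int) : Prop := out = calc_py_alt a
instance (a : List (List Int)) (out : Int) : Decidable (Spec_calc_py a out) := by unfold Spec_calc_py; infer_instance

-- ===== CLAIM (what is proved, stated in full; the proofs are below) =====
def Claim_equal_calc_py : Prop := ∀ (a : List (List Int)), Dom_calc_py a → Pre_calc_py a → Spec_calc_py a (calc_py a)

-- ===== LEMMAS AND PROOFS =====

-- number of inversion pairs, recursing on the first element
def invF : List Int → Nat
  | [] => 0
  | x :: xs => xs.countP (fun y => decide (x > y)) + invF xs

-- cross inversions between blocks, summed over the left block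
def crossL (l r : List Int) : Nat := (l.map (fun x => r.countP (fun y => decide (x > y)))).sum
-- same, summed over the right block
def crossR (l r : List Int) : Nat := (r.map (fun y => l.countP (fun x => decide (x > y)))).sum

theorem invF_append_singleton (l : List Int) (x : Int) :
    invF (l ++ [x]) = invF l + l.countP (fun y => decide (y > x)) := by
  induction l with
  | nil => simp [invF]
  | cons z l ih =>
      simp only [List.cons_append, invF, ih, List.countP_append, List.countP_cons,
        List.countP_nil]
      split_ifs <;> simp_all <;> omega

theorem invF_append (l r : List Int) :
    invF (l ++ r) = invF l + invF r + crossL l r := by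
  induction l with
  | nil => simp [invF, crossL]
  | cons x l ih =>
      simp only [List.cons_append, invF, ih, List.countP_append, crossL, List.map_cons,
        List.sum_cons]
      omega

theorem crossR_cons (x : Int) (xs r : List Int) :
    crossR (x :: xs) r = r.countP (fun y => decide (x > y)) + crossR xs r := by
  induction r with
  | nil => simp [crossR]
  | cons y ys ih =>
      simp only [crossR, List.map_cons, List.sum_cons, List.countP_cons] at *
      split_ifs <;> simp_all <;> omega

theorem crossL_eq_crossR (l r : List Int) : crossL l r = crossR l r := by
  induction l with
  | nil => simp [crossL, crossR]
  | cons x xs ih =>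
      simp only [crossL, List.map_cons, List.sum_cons] at *
      rw [crossR_cons, ← ih]

theorem crossL_perm_left {l l' : List Int} (h : l.Perm l') (r : List Int) :
    crossL l r = crossL l' r :=
  (h.map _).sum_eq

theorem crossL_perm_right (l : List Int) {r r' : List Int} (h : r.Perm r') :
    crossL l r = crossL l r' := by
  unfold crossL
  congr 1
  apply List.map_congr_left
  intro x _
  exact h.countP_eq _

theorem mergeCount_perm (l r : List Int) : (mergeCount l r).1.Perm (l ++ r) := by
  induction l, r using mergeCount.induct with
  | case1 r => simp [mergeCount]
  | case2 x xs => simp [mergeCount]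
  | case3 x xs y ys h ih =>
      simp only [mergeCount, if_pos h]
      exact ih.cons x
  | case4 x xs y ys h ih =>
      simp only [mergeCount, if_neg h]
      exact (ih.cons y).trans List.perm_middle.symm

theorem mergeCount_sorted {l r : List Int} (hl : l.Pairwise (· ≤ ·))
    (hr : r.Pairwise (· ≤ ·)) : (mergeCount l r).1.Pairwise (· ≤ ·) := by
  induction l, r using mergeCount.induct with
  | case1 r => simpa [mergeCount] using hr
  | case2 x xs => simpa [mergeCount] using hl
  | case3 x xs y ys h ih =>
      simp only [mergeCount, if_pos h]
      refine List.pairwise_cons.2 ⟨?_, ih hl.tail hr⟩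
      intro z hz
      have hz' : z ∈ xs ++ (y :: ys) := (mergeCount_perm xs (y :: ys)).mem_iff.1 hz
      rcases List.mem_append.1 hz' with h1 | h1
      · exact (List.pairwise_cons.1 hl).1 z h1
      · rcases List.mem_cons.1 h1 with rfl | h2
        · exact h
        · exact le_trans h ((List.pairwise_cons.1 hr).1 z h2)
  | case4 x xs y ys h ih =>
      simp only [mergeCount, if_neg h]
      refine List.pairwise_cons.2 ⟨?_, ih hl hr.tail⟩
      intro z hz
      have hz' : z ∈ (x :: xs) ++ ys := (mergeCount_perm (x :: xs) ys).mem_iff.1 hz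
      rcases List.mem_append.1 hz' with h1 | h1
      · rcases List.mem_cons.1 h1 with rfl | h2
        · omega
        · have := (List.pairwise_cons.1 hl).1 z h2; omega
      · exact (List.pairwise_cons.1 hr).1 z h1

theorem mergeCount_count {l r : List Int} (hl : l.Pairwise (· ≤ ·))
    (hr : r.Pairwise (· ≤ ·)) : (mergeCount l r).2 = (crossR l r : Int) := by
  induction l, r using mergeCount.induct with
  | case1 r => simp [mergeCount, crossR]
  | case2 x xs => simp [mergeCount, crossR]
  | case3 x xs y ys h ih =>
      simp only [mergeCount, if_pos h]
      rw [ih hl.tail hr]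
      have key : ∀ y' ∈ y :: ys, ((x :: xs).countP (fun z => decide (z > y'))) =
          xs.countP (fun z => decide (z > y')) := by
        intro y' hy'
        have hyy' : y ≤ y' := by
          rcases List.mem_cons.1 hy' with rfl | h2
          · exact le_refl _
          · exact (List.pairwise_cons.1 hr).1 y' h2
        simp only [List.countP_cons]
        have : ¬ x > y' := by omega
        simp [this]
      have : crossR (x :: xs) (y :: ys) = crossR xs (y :: ys) := by
        unfold crossR
        congr 1
        exact List.map_congr_left key
      rw [this]
  | case4 x xs y ys h ih =>
      simp only [mergeCount, if_neg h]
      rw [ih hl hr.tail]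
      have hall : (x :: xs).countP (fun z => decide (z > y)) = (x :: xs).length := by
        rw [List.countP_eq_length]
        intro z hz
        rcases List.mem_cons.1 hz with rfl | h2
        · simpa using h
        · have := (List.pairwise_cons.1 hl).1 z h2
          simp; omega
      have : crossR (x :: xs) (y :: ys) =
          (x :: xs).countP (fun z => decide (z > y)) + crossR (x :: xs) ys := by
        simp [crossR]
      rw [this, hall]
      push_cast
      ring

-- the main invariant of B's merge sort
theorem sortCount_good (l : List Int) :
    (sortCount l).1.Pairwise (· ≤ ·) ∧ (sortCount l).1.Perm l ∧
      (sortCount l).2 = (invF l : Int) := by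
  induction l using sortCount.induct with
  | case1 l h =>
      rw [sortCount, dif_pos h]
      match l, h with
      | [], _ => simp [invF]
      | [x], _ => simp [invF]
  | case2 l h m ih1 ih2 =>
      rw [sortCount, dif_neg h]
      show (mergeCount (sortCount (l.take m)).1 (sortCount (l.drop m)).1).1.Pairwise (· ≤ ·) ∧
        (mergeCount (sortCount (l.take m)).1 (sortCount (l.drop m)).1).1.Perm l ∧
        (sortCount (l.take m)).2 + (sortCount (l.drop m)).2 +
          (mergeCount (sortCount (l.take m)).1 (sortCount (l.drop m)).1).2 = (invF l : Int)
      obtain ⟨s1, pm1, c1⟩ := ih1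
      obtain ⟨s2, pm2, c2⟩ := ih2
      refine ⟨mergeCount_sorted s1 s2, ?_, ?_⟩
      · exact (mergeCount_perm _ _).trans ((pm1.append pm2).trans
          (by rw [List.take_append_drop]))
      · rw [c1, c2, mergeCount_count s1 s2, ← crossL_eq_crossR,
          crossL_perm_left pm1, crossL_perm_right _ pm2]
        have : invF l = invF (l.take m ++ l.drop m) := by
          rw [List.take_append_drop]
        rw [this, invF_append]
        push_cast
        ring

-- A's inner loop counts, among the first n entries, those greater than x
theorem inner_loop (xs : List Int) (x : Int) (n : Nat) (hn : n ≤ xs.length) (ans : Int) :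
    (PySem.List.pyRange 0 (n : Int) 1).foldl
      (fun ans j => if PySem.List.pyGetD xs j 0 > x then ans + 1 else ans) ans =
    ans + ((xs.take n).countP (fun y => decide (y > x)) : Int) := by
  induction n generalizing ans with
  | zero => simp [PySem.List.pyRange_one_eq_nil]
  | succ n ih =>
      have h0 : ((n : Int) + 1) = ((n + 1 : Nat) : Int) := by push_cast; ring
      rw [← h0, PySem.List.pyRange_one_succ_right (by positivity), List.foldl_append,
        ih (by omega)]
      have hlt : n < xs.length := by omega
      have hget : PySem.List.pyGetD xs (n : Int) 0 = xs[n] := PySem.List.pyGetD_ofNat xs n 0 hlt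
      have htake : xs.take (n + 1) = xs.take n ++ [xs[n]] := by
        rw [List.take_add_one]
        simp [List.getElem?_eq_getElem hlt]
      simp only [List.foldl_cons, List.foldl_nil, hget, htake, List.countP_append,
        List.countP_cons, List.countP_nil]
      by_cases hc : xs[n] > x
      · simp [hc]; push_cast; ring
      · simp [hc]

-- A's outer loop over the first n entries computes invF of the prefix
theorem outer_loop (d : List Int) (n : Nat) (hn : n ≤ d.length) :
    (PySem.List.pyRange 0 (n : Int) 1).foldl (fun ans i =>
      (PySem.List.pyRange 0 i 1).foldl
        (fun ans j => if PySem.List.pyGetD d j 0 > PySem.List.pyGetD d i 0 then ans + 1 else ans)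
        ans) 0 = (invF (d.take n) : Int) := by
  induction n with
  | zero => simp [PySem.List.pyRange_one_eq_nil, invF]
  | succ n ih =>
      have h0 : ((n : Int) + 1) = ((n + 1 : Nat) : Int) := by push_cast; ring
      rw [← h0, PySem.List.pyRange_one_succ_right (by positivity), List.foldl_append,
        ih (by omega)]
      have hlt : n < d.length := by omega
      have hget : PySem.List.pyGetD d (n : Int) 0 = d[n] := PySem.List.pyGetD_ofNat d n 0 hlt
      have htake : d.take (n + 1) = d.take n ++ [d[n]] := by
        rw [List.take_add_one]
        simp [List.getElem?_eq_getElem hlt]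
      simp only [List.foldl_cons, List.foldl_nil]
      rw [inner_loop d (PySem.List.pyGetD d (n : Int) 0) n (by omega), hget, htake,
        invF_append_singleton]
      push_cast
      ring

-- A's whole counting phase equals B's merge-sort count
theorem count_eq (d : List Int) :
    (PySem.List.pyRange 0 (d.length : Int) 1).foldl (fun ans i =>
      (PySem.List.pyRange 0 i 1).foldl
        (fun ans j => if PySem.List.pyGetD d j 0 > PySem.List.pyGetD d i 0 then ans + 1 else ans)
        ans) 0 = (sortCount d).2 := by
  rw [outer_loop d d.length (le_refl _), List.take_length, (sortCount_good d).2.2]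

-- ===== VERDICT (by name: the statement is the Claim_ definition above) =====
theorem calc_py_spec : Claim_equal_calc_py := by
  intro a _ _
  unfold Spec_calc_py
  simp only [calc_py, calc_py_alt, count_eq]
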